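-- pv_equiv track=rewrite | github.com/jaygupta-2k/color_sort | letter_func.py | move_letters
-- ===== SOURCE A (Python) =====
-- def move_letters(orig, final):
--     orig = orig.copy()
--     final = final.copy()
--     if len(final)<4 and len(orig)>0:
--         if len(final)==0 or final[-1]==orig[-1]:
--             prev_val = orig[-1]
--             while len(final)<4 and orig[-1]==prev_val:
--                 prev_val=orig[-1]
--                 final.append(orig.pop())
--                 if len(orig)==0:
--                     break
--         else:
--             return None
--     else:
--         return None
--     return [orig, final]
-- ===== SOURCE B (Python) =====
-- def move_letters(orig, final):
--     if not (len(final) < 4 and len(orig) > 0):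
--         return None
--     if final and final[-1] != orig[-1]:
--         return None
--     value = orig[-1]
--     count = 0
--     for x in reversed(orig):
--         if x != value:
--             break
--         count += 1
--     n = min(count, 4 - len(final))
--     return [orig[:len(orig) - n], final + [value] * n]
-- ===== Notes on version B (the rewrite author's own statement) =====
-- stated objective: simpler
-- what changed: Replaces A's element-by-element while loop that pops from orig and appends to final with a single counting scan of the trailing run over reversed(orig) followed by a bulk slice and list-replicate.
import Mathlib
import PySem

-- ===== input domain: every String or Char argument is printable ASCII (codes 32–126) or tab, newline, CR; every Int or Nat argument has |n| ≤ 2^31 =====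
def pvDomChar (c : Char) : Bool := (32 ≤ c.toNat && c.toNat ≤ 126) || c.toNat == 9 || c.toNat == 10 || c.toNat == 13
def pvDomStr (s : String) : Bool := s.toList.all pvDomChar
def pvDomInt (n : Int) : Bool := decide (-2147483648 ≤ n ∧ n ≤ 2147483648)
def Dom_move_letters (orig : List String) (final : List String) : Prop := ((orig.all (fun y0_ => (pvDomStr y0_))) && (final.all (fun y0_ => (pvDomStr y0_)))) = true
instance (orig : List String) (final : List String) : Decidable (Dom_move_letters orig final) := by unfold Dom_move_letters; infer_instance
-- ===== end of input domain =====

-- B replaces A's element-by-element append/pop while loop by one counting pass over the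
-- reversed list plus a bulk slice/replicate (objective: simpler decomposition, same cost).
-- A only mutates local copies, so equivalence of return values is full equivalence.

-- ===== PORT A =====
-- A's while loop: each iteration pops orig's last element onto final; we recurse over the
-- reversed orig (its head is orig[-1]); the inner match is the `if len(orig)==0: break`.
def mlLoopRev : List String → List String → String → List String × List String
  | [], final, _ => ([], final)
  | v :: rest, final, prev =>
    if final.length < 4 ∧ v = prev then
      match rest with
      | [] => ([], final ++ [v])
      | _ :: _ => mlLoopRev rest (final ++ [v]) v
    else (v :: rest, final)

-- `final[-1]==orig[-1]` is evaluated only under the nonemptiness guards, so getLast? is exact.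
def move_letters (orig : List String) (final : List String) : Option (List (List String)) :=
  if final.length < 4 ∧ orig.length > 0 then
    if final.length = 0 ∨ final.getLast? = orig.getLast? then
      let prev := (orig.getLast?).getD ""
      let p := mlLoopRev orig.reverse final prev
      some [p.1.reverse, p.2]
    else none
  else none

-- ===== PORT B =====
def move_letters_alt (orig : List String) (final : List String) : Option (List (List String)) :=
  if final.length < 4 ∧ orig.length > 0 then
    if final ≠ [] ∧ final.getLast? ≠ orig.getLast? then none
    else
      let r := orig.reverse
      let value := r.headD ""
      let count := (r.takeWhile (fun x => x = value)).length   -- B's reversed counting scan with break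
      let n := min count (4 - final.length)
      some [(r.drop n).reverse, final ++ List.replicate n value]
  else none

-- ===== PRECONDITION & SPEC =====
def Spec_move_letters (orig : List String) (final : List String) (out : Option (List (List String))) : Prop := out = move_letters_alt orig final
instance (orig : List String) (final : List String) (out : Option (List (List String))) : Decidable (Spec_move_letters orig final out) := by unfold Spec_move_letters; infer_instance

-- ===== CLAIM (what is proved, stated in full; the proofs are below) =====
def Claim_equal_move_letters : Prop := ∀ (orig : List String) (final : List String), Dom_move_letters orig final → Spec_move_letters orig final (move_letters orig final)

-- ===== LEMMAS AND PROOFS =====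

-- A's loop, started on the reversed list, drops exactly the first
-- n = min(run-length, 4 - |final|) elements (all equal to prev) and appends n copies of prev.
theorem mlLoopRev_eq (r : List String) : ∀ (final : List String) (prev : String),
    mlLoopRev r final prev =
      (r.drop (min ((r.takeWhile (fun x => x = prev)).length) (4 - final.length)),
       final ++ List.replicate (min ((r.takeWhile (fun x => x = prev)).length) (4 - final.length)) prev) := by
  induction r with
  | nil => intro final prev; simp [mlLoopRev]
  | cons v rest ih =>
    intro final prev
    simp only [mlLoopRev]
    by_cases hc : final.length < 4 ∧ v = prev
    · rw [if_pos hc]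
      obtain ⟨hf, hv⟩ := hc
      subst hv
      cases rest with
      | nil =>
        have h1 : min ((List.takeWhile (fun x => decide (x = v)) [v]).length) (4 - final.length) = 1 := by
          simp; omega
        rw [h1]; simp
      | cons w rs =>
        rw [ih]
        have ht : (List.takeWhile (fun x => decide (x = v)) (v :: w :: rs)).length
            = (List.takeWhile (fun x => decide (x = v)) (w :: rs)).length + 1 := by
          simp [List.takeWhile_cons]
        have hmin : min ((List.takeWhile (fun x => decide (x = v)) (w :: rs)).length + 1) (4 - final.length)
            = min ((List.takeWhile (fun x => decide (x = v)) (w :: rs)).length) (4 - (final ++ [v]).length) + 1 := by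
          simp only [List.length_append, List.length_cons, List.length_nil]
          omega
        rw [ht, hmin]
        simp [List.replicate_succ]
    · rw [if_neg hc]
      have hn : min ((List.takeWhile (fun x => decide (x = prev)) (v :: rest)).length) (4 - final.length) = 0 := by
        by_cases hv : v = prev
        · have hf : ¬ final.length < 4 := fun h => hc ⟨h, hv⟩
          omega
        · simp [hv]
      rw [hn]; simp

-- ===== VERDICT (by name: the statement is the Claim_ definition above) =====
theorem move_letters_spec : Claim_equal_move_letters := by
  intro orig final _
  unfold Spec_move_letters move_letters move_letters_alt
  by_cases h1 : final.length < 4 ∧ orig.length > 0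
  · rw [if_pos h1, if_pos h1]
    by_cases h2 : final.length = 0 ∨ final.getLast? = orig.getLast?
    · have hB : ¬(final ≠ [] ∧ final.getLast? ≠ orig.getLast?) := by
        rcases h2 with h | h
        · intro hc; exact hc.1 (List.length_eq_zero_iff.mp h)
        · intro hc; exact hc.2 h
      rw [if_pos h2, if_neg hB]
      have hne : orig ≠ [] := by intro h; subst h; simp at h1
      have hrev : orig.reverse ≠ [] := by simpa using hne
      obtain ⟨v, rest, hvr⟩ := List.exists_cons_of_ne_nil hrev
      have hlast : orig.getLast? = some v := by
        rw [← List.head?_reverse, hvr]; rfl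
      simp only [hvr, hlast, Option.getD_some, List.headD_cons]
      rw [mlLoopRev_eq]
    · have h2' := h2
      rw [not_or] at h2'
      have hne : final ≠ [] := by intro h; exact h2'.1 (by simp [h])
      rw [if_neg h2, if_pos (And.intro hne h2'.2)]
  · rw [if_neg h1, if_neg h1]
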